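-- pv_equiv track=rewrite | github.com/aykha18/Unitasa | app/agents/content_generation_agent.py | _parse_content_response
-- ===== SOURCE A (Python) =====
-- from typing import Dict, Any, List, Optional
--
-- def _parse_content_response(response_content: str) -> List[Dict[str, Any]]:
--     """Parse AI response into structured content variants"""
--     # Simple parsing - in production would be more sophisticated
--     lines = response_content.strip().split('\n')
--     variants = []
--
--     current_variant = {}
--     for line in lines:
--         line = line.strip()
--         if line.startswith(('1.', '2.', '3.', 'Variant', 'Post')):
--             if current_variant:
--                 variants.append(current_variant)
--             current_variant = {"text": "", "reasoning": "", "engagement": "medium"}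
--         elif current_variant:
--             if "text" not in current_variant or not current_variant["text"]:
--                 current_variant["text"] = line
--             elif "reasoning" not in current_variant or not current_variant["reasoning"]:
--                 current_variant["reasoning"] = line
--
--     if current_variant:
--         variants.append(current_variant)
--
--     # Ensure we have at least one variant
--     if not variants:
--         variants = [{
--             "text": response_content[:200],
--             "reasoning": "Generated content",
--             "engagement": "medium"
--         }]
--
--     return variants[:3]  # Return up to 3 variants
-- ===== SOURCE B (Python) =====
-- def _parse_content_response(response_content):
--     """Two-phase parse: cut the stripped lines into header-delimited segments,
--     then build one variant per segment from its first two non-empty lines."""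
--     prefixes = ('1.', '2.', '3.', 'Variant', 'Post')
--     lines = [l.strip() for l in response_content.strip().split('\n')]
--
--     if not any(l.startswith(prefixes) for l in lines):
--         return [{"text": response_content[:200],
--                  "reasoning": "Generated content",
--                  "engagement": "medium"}]
--
--     rest = lines
--     # discard everything before the first header line
--     while rest and not rest[0].startswith(prefixes):
--         rest = rest[1:]
--
--     variants = []
--     while rest and len(variants) < 3:
--         rest = rest[1:]  # skip the header line itself
--         body = []
--         while rest and not rest[0].startswith(prefixes):
--             body.append(rest[0])
--             rest = rest[1:]
--         content = [l for l in body if l]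
--         variants.append({"text": content[0] if content else "",
--                          "reasoning": content[1] if len(content) > 1 else "",
--                          "engagement": "medium"})
--     return variants
-- ===== Notes on version B (the rewrite author's own statement) =====
-- stated objective: alternative
-- what changed: Replaces A's single-pass mutable-dict state machine (flush-on-header, fill-first-empty-field) by a two-phase parse: pre-strip all lines, guard the fallback with an any-header check, drop the preamble, then cut the list into header-delimited segments and build each variant from a segment's first two non-empty lines, stopping after three variants.
import Mathlib
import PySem

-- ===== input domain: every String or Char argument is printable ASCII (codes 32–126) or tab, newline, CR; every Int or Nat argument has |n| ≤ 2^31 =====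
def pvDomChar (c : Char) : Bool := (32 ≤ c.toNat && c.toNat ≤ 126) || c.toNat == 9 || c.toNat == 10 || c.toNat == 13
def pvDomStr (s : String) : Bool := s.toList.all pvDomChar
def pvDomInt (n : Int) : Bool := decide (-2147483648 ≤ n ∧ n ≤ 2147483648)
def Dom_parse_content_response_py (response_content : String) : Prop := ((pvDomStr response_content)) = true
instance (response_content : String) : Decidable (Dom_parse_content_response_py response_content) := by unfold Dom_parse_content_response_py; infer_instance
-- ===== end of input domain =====

-- B replaces A's one-pass mutable-dict state machine by a two-phase parse (strip all
-- lines, drop the preamble, cut into header-delimited segments, build each variant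
-- from a segment's first two non-empty lines); objective: alternative decomposition.

-- ===== PORT A =====
-- line.startswith(('1.', '2.', '3.', 'Variant', 'Post'))  (same tuple test in both Pythons)
def pvIsHeader (line : String) : Bool :=
  PySem.Str.startswith line "1." || PySem.Str.startswith line "2." ||
    PySem.Str.startswith line "3." || PySem.Str.startswith line "Variant" ||
    PySem.Str.startswith line "Post"

-- current_variant's keys are always exactly "text","reasoning","engagement" (insertion
-- order; "engagement" is never reassigned), so the dict is modelled as Option (text, reasoning)
-- (none = the initial empty dict {}); rendered to the association list by pvVariantItems.
def pvVariantItems (t r : String) : List (String × String) :=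
  [("text", t), ("reasoning", r), ("engagement", "medium")]

-- the 'for line in lines' loop; the always-present keys make the
-- '"text" not in current_variant' disjuncts constant-false, leaving the emptiness tests
def pvLoopA : List String → List (List (String × String)) → Option (String × String) →
    List (List (String × String))
  | [], variants, cur =>
    match cur with
    | some (t, r) => variants ++ [pvVariantItems t r]
    | none => variants
  | l :: ls, variants, cur =>
    let line := PySem.Str.strip l
    if pvIsHeader line then
      match cur with
      | some (t, r) => pvLoopA ls (variants ++ [pvVariantItems t r]) (some ("", ""))
      | none => pvLoopA ls variants (some ("", ""))
    else
      match cur with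
      | some (t, r) =>
        if t = "" then pvLoopA ls variants (some (line, r))
        else if r = "" then pvLoopA ls variants (some (t, line))
        else pvLoopA ls variants (some (t, r))
      | none => pvLoopA ls variants none

def parse_content_response_py (response_content : String) : List (List (String × String)) :=
  -- sep "\n" ≠ "", so split? never returns none
  let lines := (PySem.Str.split? (PySem.Str.strip response_content) "\n").getD []
  let variants := pvLoopA lines [] none
  let variants :=
    if variants.isEmpty then
      [[("text", PySem.Str.slice response_content none (some 200)),
        ("reasoning", "Generated content"), ("engagement", "medium")]]
    else variants
  PySem.List.slice variants none (some 3)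

-- ===== PORT B =====
-- 'while rest and not rest[0].startswith(prefixes): rest = rest[1:]'
def pvDropPre : List String → List String
  | [] => []
  | x :: xs => if pvIsHeader x then x :: xs else pvDropPre xs

-- inner 'while rest and not rest[0].startswith(prefixes): body.append(rest[0]); rest = rest[1:]'
-- returns (body, remaining rest)
def pvBody : List String → List String × List String
  | [] => ([], [])
  | x :: xs =>
    if pvIsHeader x then ([], x :: xs)
    else
      let p := pvBody xs
      (x :: p.1, p.2)

theorem pvBody_snd_length_le (xs : List String) : (pvBody xs).2.length ≤ xs.length := by
  induction xs with
  | nil => simp [pvBody]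
  | cons x xs ih =>
    simp only [pvBody]
    split
    · simp
    · simpa using Nat.le_succ_of_le ih

-- outer 'while rest and len(variants) < 3' loop (k = 3 - len(variants))
def pvLoopB : List String → Nat → List (List (String × String))
  | [], _ => []
  | _ :: _, 0 => []
  | _ :: xs, Nat.succ k =>
    let p := pvBody xs
    let content := p.1.filter (fun l => l ≠ "")
    pvVariantItems (content.headD "") ((content.drop 1).headD "") :: pvLoopB p.2 k
termination_by rest _ => rest.length
decreasing_by exact Nat.lt_succ_of_le (pvBody_snd_length_le _)

def parse_content_response_py_alt (response_content : String) : List (List (String × String)) :=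
  let lines := ((PySem.Str.split? (PySem.Str.strip response_content) "\n").getD []).map
    PySem.Str.strip
  if !(lines.any pvIsHeader) then
    [[("text", PySem.Str.slice response_content none (some 200)),
      ("reasoning", "Generated content"), ("engagement", "medium")]]
  else
    pvLoopB (pvDropPre lines) 3

-- ===== PRECONDITION & SPEC =====
def Spec_parse_content_response_py (response_content : String) (out : List (List (String × String))) : Prop := out = parse_content_response_py_alt response_content
instance (response_content : String) (out : List (List (String × String))) : Decidable (Spec_parse_content_response_py response_content out) := by unfold Spec_parse_content_response_py; infer_instance

-- ===== CLAIM (what is proved, stated in full; the proofs are below) =====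
def Claim_equal_parse_content_response_py : Prop := ∀ (response_content : String), Dom_parse_content_response_py response_content → Spec_parse_content_response_py response_content (parse_content_response_py response_content)

-- ===== LEMMAS AND PROOFS =====

-- proof-side: pvLoopA on pre-stripped lines (no strip inside)
def pvLoopAs : List String → List (List (String × String)) → Option (String × String) →
    List (List (String × String))
  | [], variants, cur =>
    match cur with
    | some (t, r) => variants ++ [pvVariantItems t r]
    | none => variants
  | line :: ls, variants, cur =>
    if pvIsHeader line then
      match cur with
      | some (t, r) => pvLoopAs ls (variants ++ [pvVariantItems t r]) (some ("", ""))
      | none => pvLoopAs ls variants (some ("", ""))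
    else
      match cur with
      | some (t, r) =>
        if t = "" then pvLoopAs ls variants (some (line, r))
        else if r = "" then pvLoopAs ls variants (some (t, line))
        else pvLoopAs ls variants (some (t, r))
      | none => pvLoopAs ls variants none

theorem pvLoopA_eq_pvLoopAs (ls : List String) (v : List (List (String × String)))
    (cur : Option (String × String)) :
    pvLoopA ls v cur = pvLoopAs (ls.map PySem.Str.strip) v cur := by
  induction ls generalizing v cur with
  | nil => rfl
  | cons l ls ih => simp only [pvLoopA, pvLoopAs, List.map]; split <;> [skip; skip] <;>
      cases cur <;> simp_all

-- proof-side: the unbounded segment loop (pvLoopB without the counter)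
def pvAll : List String → List (List (String × String))
  | [] => []
  | _ :: xs =>
    let p := pvBody xs
    let content := p.1.filter (fun l => l ≠ "")
    pvVariantItems (content.headD "") ((content.drop 1).headD "") :: pvAll p.2
termination_by rest => rest.length
decreasing_by exact Nat.lt_succ_of_le (pvBody_snd_length_le _)

theorem pvLoopB_eq_take (rest : List String) (k : Nat) :
    pvLoopB rest k = (pvAll rest).take k := by
  induction rest using pvAll.induct generalizing k with
  | case1 => cases k <;> simp [pvLoopB, pvAll]
  | case2 x xs p ih =>
    cases k with
    | zero => simp [pvLoopB]
    | succ k =>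
      have ih' : ∀ k, pvLoopB (pvBody xs).2 k = List.take k (pvAll (pvBody xs).2) := ih
      rw [pvLoopB, pvAll]; simp [ih']

theorem pvBody_spec (xs : List String) :
    pvBody xs = (xs.takeWhile (fun l => !pvIsHeader l), xs.dropWhile (fun l => !pvIsHeader l)) := by
  induction xs with
  | nil => rfl
  | cons x xs ih =>
    simp only [pvBody, List.takeWhile, List.dropWhile]
    by_cases h : pvIsHeader x <;> simp [h, ih]

-- A's fill rule: the first empty field takes the line
def pvFill : String × String → List String → String × String
  | tr, [] => tr
  | (t, r), x :: xs =>
    if t = "" then pvFill (x, r) xs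
    else if r = "" then pvFill (t, x) xs
    else pvFill (t, r) xs

theorem pvFill_saturated (xs : List String) (t r : String) (ht : t ≠ "") (hr : r ≠ "") :
    pvFill (t, r) xs = (t, r) := by
  induction xs with
  | nil => rfl
  | cons x xs ih => simp [pvFill, ht, hr, ih]

theorem pvFill_half (xs : List String) (t : String) (ht : t ≠ "") :
    pvFill (t, "") xs = (t, ((xs.filter (fun l => l ≠ "")).headD "")) := by
  induction xs with
  | nil => rfl
  | cons x xs ih =>
    by_cases hx : x = ""
    · simp [pvFill, ht, hx, ih]
    · simp [pvFill, ht, hx, pvFill_saturated xs t x ht hx, List.filter]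

theorem pvFill_empty (xs : List String) :
    pvFill ("", "") xs =
      (((xs.filter (fun l => l ≠ "")).headD ""),
        (((xs.filter (fun l => l ≠ "")).drop 1).headD "")) := by
  induction xs with
  | nil => rfl
  | cons x xs ih =>
    by_cases hx : x = ""
    · simp [pvFill, hx, ih]
    · simp [pvFill, hx, pvFill_half xs x hx, List.filter]

-- filling a run of non-header lines
theorem pvLoopAs_fill (body : List String) (rest : List String)
    (hb : ∀ l ∈ body, pvIsHeader l = false) (v : List (List (String × String)))
    (tr : String × String) :
    pvLoopAs (body ++ rest) v (some tr) = pvLoopAs rest v (some (pvFill tr body)) := by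
  induction body generalizing tr with
  | nil => rfl
  | cons x xs ih =>
    obtain ⟨t, r⟩ := tr
    have hx : pvIsHeader x = false := hb x (by simp)
    simp only [List.cons_append, pvLoopAs, hx, Bool.false_eq_true, if_false, pvFill]
    by_cases ht : t = ""
    · simpa [ht] using ih (fun l hl => hb l (by simp [hl])) (x, r)
    · by_cases hr : r = ""
      · simpa [ht, hr] using ih (fun l hl => hb l (by simp [hl])) (t, x)
      · simpa [ht, hr] using ih (fun l hl => hb l (by simp [hl])) (t, r)

-- skipping a headerless run with no current variant
theorem pvLoopAs_skip (body : List String) (rest : List String)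
    (hb : ∀ l ∈ body, pvIsHeader l = false) (v : List (List (String × String))) :
    pvLoopAs (body ++ rest) v none = pvLoopAs rest v none := by
  induction body with
  | nil => rfl
  | cons x xs ih =>
    have hx : pvIsHeader x = false := hb x (by simp)
    simp only [List.cons_append, pvLoopAs, hx, Bool.false_eq_true, if_false]
    exact ih (fun l hl => hb l (by simp [hl]))

theorem pvDropPre_spec (ls : List String) :
    pvDropPre ls = ls.dropWhile (fun l => !pvIsHeader l) := by
  induction ls with
  | nil => rfl
  | cons x xs ih =>
    simp only [pvDropPre, List.dropWhile]
    by_cases h : pvIsHeader x <;> simp [h, ih]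

-- the main correspondence, along pvAll's recursion: from a header-leading (or empty) rest,
-- A's loop with no current variant appends pvAll rest; with a current variant it flushes it first
theorem pvLoopAs_main (rest : List String) :
    (rest = [] ∨ pvIsHeader (rest.headD "") = true) →
    (∀ v, pvLoopAs rest v none = v ++ pvAll rest) ∧
    (∀ v t r, pvLoopAs rest v (some (t, r)) = v ++ [pvVariantItems t r] ++ pvAll rest) := by
  induction rest using pvAll.induct with
  | case1 =>
    intro _
    constructor
    · intro v; simp [pvLoopAs, pvAll]
    · intro v t r; simp [pvLoopAs, pvAll]
  | case2 x xs p ih =>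
    intro h
    have hx : pvIsHeader x = true := by simpa using h
    have hsplit : xs = xs.takeWhile (fun l => !pvIsHeader l) ++
        xs.dropWhile (fun l => !pvIsHeader l) := (List.takeWhile_append_dropWhile).symm
    have hbody : ∀ l ∈ xs.takeWhile (fun l => !pvIsHeader l), pvIsHeader l = false := by
      intro l hl; simpa using List.mem_takeWhile_imp hl
    have hrest2 : (pvBody xs).2 = xs.dropWhile (fun l => !pvIsHeader l) := by
      rw [pvBody_spec]
    have hrest : (pvBody xs).2 = [] ∨ pvIsHeader ((pvBody xs).2.headD "") = true := by
      rw [hrest2]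
      cases hd : xs.dropWhile (fun l => !pvIsHeader l) with
      | nil => exact Or.inl rfl
      | cons y ys =>
        right
        have := List.head_dropWhile_not (p := fun l => !pvIsHeader l) (l := xs) (by simp [hd])
        simp only [hd] at this ⊢
        simpa using this
    obtain ⟨ihn, ihs⟩ := ih hrest
    -- shared continuation: after the header, fill the body then recurse on rest'
    have cont : ∀ v, pvLoopAs xs v (some ("", "")) =
        v ++ pvAll (x :: xs) := by
      intro v
      conv_lhs => rw [hsplit]
      rw [pvLoopAs_fill _ _ hbody v ("", ""), pvFill_empty, ← hrest2]
      rw [ihs]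
      have hp : pvAll p.2 = pvAll ((pvBody xs).2) := rfl
      rw [pvAll]
      simp only [hp, hrest2]
      simp [pvBody_spec]
    constructor
    · intro v
      simp only [pvLoopAs, hx, if_true]
      exact cont v
    · intro v t r
      simp only [pvLoopAs, hx, if_true]
      rw [cont (v ++ [pvVariantItems t r])]

-- the segment list of a header-leading rest is never empty
theorem pvAll_cons_ne_nil (x : String) (xs : List String) : pvAll (x :: xs) ≠ [] := by
  rw [pvAll]; simp

theorem pvSkip_to_drop (sl : List String) (v : List (List (String × String))) :
    pvLoopAs sl v none = pvLoopAs (sl.dropWhile (fun l => !pvIsHeader l)) v none := by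
  conv_lhs => rw [← List.takeWhile_append_dropWhile (p := fun l => !pvIsHeader l) (l := sl)]
  exact pvLoopAs_skip _ _ (fun l hl => by simpa using List.mem_takeWhile_imp hl) v

-- ===== VERDICT (by name: the statement is the Claim_ definition above) =====
theorem parse_content_response_py_spec : Claim_equal_parse_content_response_py := by
  unfold Claim_equal_parse_content_response_py
  intro rc _
  unfold Spec_parse_content_response_py parse_content_response_py parse_content_response_py_alt
  simp only [pvLoopA_eq_pvLoopAs]
  set sl := ((PySem.Str.split? (PySem.Str.strip rc) "\n").getD []).map PySem.Str.strip with hsl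
  rw [pvSkip_to_drop]
  by_cases hany : sl.any pvIsHeader
  · -- at least one header line: no fallback on either side
    have hdrop_ne : sl.dropWhile (fun l => !pvIsHeader l) ≠ [] := by
      rw [Ne, List.dropWhile_eq_nil_iff]
      intro hall
      obtain ⟨x, hx, hpx⟩ := List.any_eq_true.mp hany
      simpa [hpx] using hall x hx
    obtain ⟨y, ys, hd⟩ := List.exists_cons_of_ne_nil hdrop_ne
    have hhead : pvIsHeader ((sl.dropWhile (fun l => !pvIsHeader l)).headD "") = true := by
      have := List.head_dropWhile_not (p := fun l => !pvIsHeader l) (l := sl) (by simp [hd])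
      simp only [hd] at this ⊢
      simpa using this
    rw [(pvLoopAs_main _ (Or.inr hhead)).1 []]
    have hne : pvAll (sl.dropWhile (fun l => !pvIsHeader l)) ≠ [] := by
      rw [hd]; exact pvAll_cons_ne_nil y ys
    rw [pvDropPre_spec, pvLoopB_eq_take,
      PySem.List.slice_to _ (by norm_num : (0:Int) ≤ 3)]
    rw [if_neg (by simpa [List.isEmpty_iff] using hne)]
    simp only [hany, Bool.not_true, Bool.false_eq_true, if_false, List.nil_append]
    congr 1
  · -- no header line anywhere: A's loop yields [], both sides fall back
    have hdrop : sl.dropWhile (fun l => !pvIsHeader l) = [] := by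
      rw [List.dropWhile_eq_nil_iff]
      intro x hx
      simp only [List.any_eq_true, not_exists] at hany
      simp only [Bool.not_eq_eq_eq_not, Bool.not_true]
      exact Bool.eq_false_iff.mpr (fun h => hany x ⟨hx, h⟩)
    rw [hdrop]
    simp only [pvLoopAs, List.isEmpty_nil, if_true, hany, Bool.not_false,
      PySem.List.slice_to _ (by norm_num : (0:Int) ≤ 3)]
    rfl
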